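-- pv_equiv track=rewrite | github.com/ssMinji/Algorithms | 3085.py | check_old
-- ===== SOURCE A (Python) =====
-- def check_old(mat):
--     n = len(mat)
--     ans = 1
--     for i in range(n):
--         cnt = 1
--         for j in range(1, n):
--             if mat[i][j] == mat[i][j-1]:
--                 cnt +=1
--             else:
--                 cnt = 1
--             ans = max(ans, cnt)
--         cnt = 1
--         for j in range(1, n):
--             if mat[j][i] == mat[j-1][i]:
--                 cnt += 1
--             else:
--                 cnt = 1
--             ans = max(ans, cnt)
--     return ans
-- ===== SOURCE B (Python) =====
-- def _info(seq, lo, hi):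
--     # divide & conquer: (pref, suff, best, first, last) run info of seq[lo:hi], hi - lo >= 1
--     if hi - lo == 1:
--         v = seq[lo]
--         return (1, 1, 1, v, v)
--     mid = (lo + hi) // 2
--     pl, sl, bl, fl, ll = _info(seq, lo, mid)
--     pr, sr, br, fr, lr = _info(seq, mid, hi)
--     best = max(bl, br)
--     if ll == fr:
--         best = max(best, sl + pr)
--     pref = pl + pr if ll == fr and pl == mid - lo else pl
--     suff = sr + sl if ll == fr and sr == hi - mid else sr
--     return (pref, suff, best, fl, lr)
--
--
-- def check_old(mat):
--     n = len(mat)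
--     ans = 1
--     for i in range(n):
--         ans = max(ans, _info([mat[i][j] for j in range(n)], 0, n)[2])
--         ans = max(ans, _info([mat[j][i] for j in range(n)], 0, n)[2])
--     return ans
-- ===== Notes on version B (the rewrite author's own statement) =====
-- stated objective: alternative
-- what changed: Replaces A's linear reset-counter scan with a divide-and-conquer: each row/column is split recursively in halves and (prefix-run, suffix-run, best-run, first, last) tuples are merged, combining runs across the midpoint; same O(n^2) total work per matrix line set.
-- outside the precondition, e.g. on check_old([[]]): A returns 1, B raises IndexError
import Mathlib
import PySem

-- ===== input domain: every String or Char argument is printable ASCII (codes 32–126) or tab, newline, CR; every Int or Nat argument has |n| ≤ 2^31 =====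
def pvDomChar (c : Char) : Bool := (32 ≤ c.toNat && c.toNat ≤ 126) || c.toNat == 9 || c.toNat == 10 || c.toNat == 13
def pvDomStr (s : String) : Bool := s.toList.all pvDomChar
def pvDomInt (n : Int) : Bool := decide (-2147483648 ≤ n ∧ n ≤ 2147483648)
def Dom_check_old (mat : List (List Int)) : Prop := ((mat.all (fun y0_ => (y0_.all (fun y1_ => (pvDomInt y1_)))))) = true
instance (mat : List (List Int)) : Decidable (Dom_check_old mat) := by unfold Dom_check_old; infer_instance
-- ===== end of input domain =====

-- B replaces A's reset-counter scan with a divide-and-conquer merge of (prefix-run, suffix-run, best-run, first, last)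
-- tuples per row/column (alternative algorithm, same O(n^2) total); equivalence is about the return value.

-- ===== PORT A =====
def check_old (mat : List (List Int)) : Int :=
  let n : Int := (mat.length : Int)
  (PySem.List.pyRange 0 n 1).foldl
    (fun ans i =>
      let p1 := (PySem.List.pyRange 1 n 1).foldl
        (fun (p : Int × Int) j =>
          let cnt := if PySem.List.pyGetD (PySem.List.pyGetD mat i []) j 0
                        == PySem.List.pyGetD (PySem.List.pyGetD mat i []) (j - 1) 0
                     then p.1 + 1 else 1
          (cnt, max p.2 cnt)) (1, ans)
      let p2 := (PySem.List.pyRange 1 n 1).foldl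
        (fun (p : Int × Int) j =>
          let cnt := if PySem.List.pyGetD (PySem.List.pyGetD mat j []) i 0
                        == PySem.List.pyGetD (PySem.List.pyGetD mat (j - 1) []) i 0
                     then p.1 + 1 else 1
          (cnt, max p.2 cnt)) (1, p1.2)
      p2.2) 1

-- ===== PORT B =====
-- the merge of the two halves' (pref, suff, best, first, last) tuples (body of _info's else branch)
def mergeB (L R : Int × Int × Int × Int × Int) (nl nr : Nat) : Int × Int × Int × Int × Int :=
  let pl := L.1; let sl := L.2.1; let bl := L.2.2.1; let fl := L.2.2.2.1; let ll := L.2.2.2.2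
  let pr := R.1; let sr := R.2.1; let br := R.2.2.1; let fr := R.2.2.2.1; let lr := R.2.2.2.2
  let best := max bl br
  let best := if ll == fr then max best (sl + pr) else best
  let pref := if ll == fr && pl == (nl : Int) then pl + pr else pl
  let suff := if ll == fr && sr == (nr : Int) then sr + sl else sr
  (pref, suff, best, fl, lr)

-- _info(seq, lo, hi); the 'hi ≤ lo + 1' test only makes the recursion total (Python never calls with hi ≤ lo)
def dcInfo (seq : List Int) (lo hi : Nat) : Int × Int × Int × Int × Int :=
  if hi ≤ lo + 1 then
    (1, 1, 1, seq.getD lo 0, seq.getD lo 0)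
  else
    mergeB (dcInfo seq lo ((lo + hi) / 2)) (dcInfo seq ((lo + hi) / 2) hi)
      ((lo + hi) / 2 - lo) (hi - (lo + hi) / 2)
termination_by hi - lo
decreasing_by all_goals omega

def check_old_alt (mat : List (List Int)) : Int :=
  let n := mat.length
  (List.range n).foldl
    (fun ans i =>
      let ans := max ans (dcInfo ((List.range n).map (fun j => (mat.getD i []).getD j 0)) 0 n).2.2.1
      max ans (dcInfo ((List.range n).map (fun j => (mat.getD j []).getD i 0)) 0 n).2.2.1) 1

-- ===== PRECONDITION & SPEC =====
-- Pre_ excludes matrices with a row shorter than len(mat): for n ≥ 2 A raises IndexError there,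
-- and for n = 1 (e.g. [[]]) A returns 1 without reading any cell only because its loops are empty,
-- while B's row/column comprehensions index the row and raise.
def Pre_check_old (mat : List (List Int)) : Prop := ∀ r ∈ mat, mat.length ≤ r.length
instance (mat : List (List Int)) : Decidable (Pre_check_old mat) := by unfold Pre_check_old; infer_instance
def pvWitness_check_old : List (List Int) := [[1, 1], [2, 1]]

def Spec_check_old (mat : List (List Int)) (out : Int) : Prop := out = check_old_alt mat
instance (mat : List (List Int)) (out : Int) : Decidable (Spec_check_old mat out) := by unfold Spec_check_old; infer_instance

-- ===== CLAIM (what is proved, stated in full; the proofs are below) =====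
def Claim_equal_check_old : Prop := ∀ (mat : List (List Int)), Dom_check_old mat → Pre_check_old mat → Spec_check_old mat (check_old mat)

-- ===== LEMMAS AND PROOFS =====

-- clean specification of the longest equal run of a list (1 on [])
def lrSpec : List Int → Int
  | [] => 1
  | x :: xs =>
      max (((xs.takeWhile (fun y => y == x)).length : Int) + 1)
        (lrSpec (xs.dropWhile (fun y => y == x)))
termination_by l => l.length
decreasing_by
  have := List.length_dropWhile_le (fun y => y == x) xs
  simp only [List.length_cons]
  omega

-- A's inner loop as a recursion over the values it compares
def scanPairs : Int → Int → Int → List Int → Int × Int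
  | _, cnt, ans, [] => (cnt, ans)
  | x, cnt, ans, y :: ys =>
      let c := if y == x then cnt + 1 else 1
      scanPairs y c (max ans c) ys

theorem scanPairs_eq : ∀ (xs : List Int) (x cnt ans : Int), 1 ≤ ans → cnt ≤ ans →
    (scanPairs x cnt ans xs).2 =
      max ans (max (cnt + ((xs.takeWhile (fun y => y == x)).length : Int))
        (lrSpec (xs.dropWhile (fun y => y == x)))) := by
  intro xs
  induction xs with
  | nil =>
      intro x cnt ans h1 h2
      simp only [scanPairs, List.takeWhile_nil, List.dropWhile_nil, List.length_nil, lrSpec]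
      omega
  | cons y ys ih =>
      intro x cnt ans h1 h2
      by_cases hyx : (y == x) = true
      · have hyx' : y = x := (beq_iff_eq).1 hyx
        subst hyx'
        simp only [scanPairs, List.takeWhile_cons, List.dropWhile_cons, beq_self_eq_true,
          ite_true, List.length_cons]
        rw [ih y (cnt + 1) (max ans (cnt + 1)) (by omega) (by omega)]
        push_cast
        omega
      · have hyx' : (y == x) = false := by simp_all
        simp only [scanPairs, List.takeWhile_cons, List.dropWhile_cons, hyx',
          Bool.false_eq_true, if_false]
        rw [ih y 1 (max ans 1) (by omega) (by omega)]
        simp only [List.length_nil]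
        rw [lrSpec]
        omega

theorem scanPairs_head (xs : List Int) (x ans : Int) (h : 1 ≤ ans) :
    (scanPairs x 1 ans xs).2 = max ans (lrSpec (x :: xs)) := by
  rw [scanPairs_eq xs x 1 ans h h, lrSpec]
  omega

theorem bridgeA (g : Int → Int) (n : Int) : ∀ (m : Nat) (a cnt ans : Int), (n - a).toNat = m →
    ((PySem.List.pyRange a n 1).foldl
      (fun (p : Int × Int) j =>
        (if g j == g (j - 1) then p.1 + 1 else 1,
         max p.2 (if g j == g (j - 1) then p.1 + 1 else 1))) (cnt, ans))
    = scanPairs (g (a - 1)) cnt ans ((PySem.List.pyRange a n 1).map g) := by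
  intro m
  induction m with
  | zero =>
      intro a cnt ans hm
      rw [PySem.List.pyRange_one_eq_nil (by omega)]
      rfl
  | succ m ih =>
      intro a cnt ans hm
      rw [PySem.List.pyRange_one_cons (by omega)]
      simp only [List.foldl_cons, List.map_cons]
      rw [ih (a + 1) _ _ (by omega)]
      rw [scanPairs]
      norm_num

theorem foldl_inv {α : Type} (f g : Int → α → Int) (P : Int → Prop) :
    ∀ (l : List α) (a : Int), P a → (∀ b x, x ∈ l → P b → f b x = g b x ∧ P (g b x)) →
      l.foldl f a = l.foldl g a := by
  intro l
  induction l with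
  | nil => intro a _ _; rfl
  | cons x xs ih =>
      intro a ha h
      simp only [List.foldl_cons]
      obtain ⟨heq, hP⟩ := h a x (by simp) ha
      rw [heq]
      exact ih _ hP (fun b y hy hb => h b y (by simp [hy]) hb)

-- ---- run-length-encoding machinery for the D&C proof ----

-- prepend a run (x, k) to an RLE list, merging with its head run if the value matches
def consRK (x : Int) (k : Nat) (R : List (Int × Nat)) : List (Int × Nat) :=
  match R with
  | (y, j) :: t => if x == y then (x, k + j) :: t else (x, k) :: (y, j) :: t
  | [] => [(x, k)]

def rle (l : List Int) : List (Int × Nat) := l.foldr (fun x R => consRK x 1 R) []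

def fuse (A B : List (Int × Nat)) : List (Int × Nat) := A.foldr (fun p acc => consRK p.1 p.2 acc) B

def maxC (R : List (Int × Nat)) : Int := R.foldl (fun a p => max a ((p.2 : Int))) 1

-- the (pref, suff, best, first, last) tuple of a nonempty list, read off its RLE
def specOf (l : List Int) : Int × Int × Int × Int × Int :=
  ((((rle l).headD (0, 0)).2 : Int), (((rle l).getLastD (0, 0)).2 : Int), maxC (rle l),
    ((rle l).headD (0, 0)).1, ((rle l).getLastD (0, 0)).1)

theorem consRK_consRK (x y : Int) (k j : Nat) (D : List (Int × Nat)) :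
    consRK x k (consRK y j D) =
      if x == y then consRK x (k + j) D else (x, k) :: consRK y j D := by
  
  cases D with
  | nil =>
      by_cases h : x = y
      · subst h; simp [consRK]
      · simp [consRK, beq_iff_eq, h]
  | cons p t =>
      obtain ⟨z, c⟩ := p
      by_cases hyz : y = z
      · subst hyz
        by_cases hxy : x = y
        · subst hxy
          simp [consRK, Nat.add_assoc]
        · simp [consRK, beq_iff_eq, hxy]
      · by_cases hxy : x = y
        · subst hxy
          simp [consRK, beq_iff_eq, hyz]
        · simp [consRK, beq_iff_eq, hxy, hyz]

theorem foldr_consR_eq_fuse : ∀ (l : List Int) (B : List (Int × Nat)),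
    l.foldr (fun x R => consRK x 1 R) B = fuse (rle l) B := by
  
  intro l
  induction l with
  | nil => intro B; rfl
  | cons x l' ih =>
      intro B
      simp only [List.foldr_cons, ih B]
      show consRK x 1 (fuse (rle l') B) = fuse (rle (x :: l')) B
      have hx : rle (x :: l') = consRK x 1 (rle l') := rfl
      rw [hx]
      cases h : rle l' with
      | nil => simp [fuse, consRK]
      | cons p t =>
          obtain ⟨y, k⟩ := p
          have hfuse : fuse ((y, k) :: t) B = consRK y k (fuse t B) := rfl
          rw [hfuse, consRK_consRK]
          by_cases hxy : x = y
          · subst hxy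
            simp only [beq_self_eq_true, if_pos]
            show consRK x (1 + k) (fuse t B) = fuse (consRK x 1 ((x, k) :: t)) B
            simp only [consRK, beq_self_eq_true, if_pos]
            rfl
          · simp only [beq_iff_eq, hxy, ite_false]
            have h2 : consRK x 1 ((y, k) :: t) = (x, 1) :: (y, k) :: t := by
              simp [consRK, beq_iff_eq, hxy]
            rw [h2]
            show (x, 1) :: consRK y k (fuse t B) = consRK x 1 (consRK y k (fuse t B))
            rw [consRK_consRK]
            simp [beq_iff_eq, hxy]

theorem rle_append (l r : List Int) : rle (l ++ r) = fuse (rle l) (rle r) := by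
  rw [rle, List.foldr_append]
  exact foldr_consR_eq_fuse l _

theorem rle_chain (l : List Int) : List.IsChain (fun p q => p.1 ≠ q.1) (rle l) := by
  
  have key : ∀ (x : Int) (R : List (Int × Nat)),
      List.IsChain (fun p q => p.1 ≠ q.1) R → List.IsChain (fun p q => p.1 ≠ q.1) (consRK x 1 R) := by
    intro x R hR
    cases R with
    | nil => exact List.isChain_singleton _
    | cons p t =>
        obtain ⟨y, j⟩ := p
        by_cases hxy : x = y
        · subst hxy
          simp only [consRK, beq_self_eq_true, if_pos]
          cases t with
          | nil => exact List.isChain_singleton _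
          | cons q t' =>
              rw [List.isChain_cons_cons] at hR ⊢
              exact ⟨hR.1, hR.2⟩
        · simp only [consRK, beq_iff_eq, hxy, ite_false]
          rw [List.isChain_cons_cons]
          exact ⟨hxy, hR⟩
  induction l with
  | nil => exact List.isChain_nil
  | cons x l' ih => exact key x (rle l') ih

theorem rle_pos (l : List Int) : ∀ p ∈ rle l, 1 ≤ p.2 := by
  
  have key : ∀ (x : Int) (k : Nat) (R : List (Int × Nat)), 1 ≤ k → (∀ p ∈ R, 1 ≤ p.2) →
      ∀ p ∈ consRK x k R, 1 ≤ p.2 := by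
    intro x k R hk hR p hp
    cases R with
    | nil =>
        simp only [consRK, List.mem_singleton] at hp
        subst hp; exact hk
    | cons q t =>
        obtain ⟨y, j⟩ := q
        by_cases hxy : x = y
        · subst hxy
          simp only [consRK, beq_self_eq_true, if_pos, List.mem_cons] at hp
          rcases hp with hp | hp
          · subst hp; simp; omega
          · exact hR p (by simp [hp])
        · simp only [consRK, beq_iff_eq, hxy, ite_false, List.mem_cons] at hp
          rcases hp with hp | hp
          · subst hp; exact hk
          · exact hR p (by simpa using hp)
  induction l with
  | nil => intro p hp; simp [rle] at hp
  | cons x l' ih => exact key x 1 (rle l') le_rfl ih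

theorem rle_sum (l : List Int) : ((rle l).map Prod.snd).sum = l.length := by
  
  have key : ∀ (x : Int) (k : Nat) (R : List (Int × Nat)),
      ((consRK x k R).map Prod.snd).sum = k + (R.map Prod.snd).sum := by
    intro x k R
    cases R with
    | nil => simp [consRK]
    | cons q t =>
        obtain ⟨y, j⟩ := q
        by_cases hxy : x = y
        · subst hxy; simp [consRK]; omega
        · simp [consRK, beq_iff_eq, hxy]
  induction l with
  | nil => rfl
  | cons x l' ih =>
      show ((consRK x 1 (rle l')).map Prod.snd).sum = (x :: l').length
      rw [key, ih]
      simp only [List.length_cons]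
      omega

theorem rle_ne_nil (l : List Int) (h : l ≠ []) : rle l ≠ [] := by
  
  cases l with
  | nil => exact absurd rfl h
  | cons x l' =>
      show consRK x 1 (rle l') ≠ []
      cases hR : rle l' with
      | nil => simp [consRK]
      | cons p t =>
          obtain ⟨y, j⟩ := p
          by_cases hxy : x = y
          · subst hxy; simp [consRK]
          · simp [consRK, beq_iff_eq, hxy]

-- fold-max toolkit
theorem foldl_max_le (R : List (Int × Nat)) : ∀ a : Int, a ≤ R.foldl (fun a p => max a ((p.2 : Int))) a := by
  
  induction R with
  | nil => intro a; exact le_refl a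
  | cons p t ih =>
      intro a
      exact le_trans (le_max_left a (p.2 : Int)) (ih (max a (p.2 : Int)))

theorem foldl_max_init (R : List (Int × Nat)) : ∀ a b : Int, b ≤ a →
    R.foldl (fun a p => max a ((p.2 : Int))) a = max a (R.foldl (fun a p => max a ((p.2 : Int))) b) := by
  
  induction R with
  | nil =>
      intro a b hab
      simp only [List.foldl_nil]
      omega
  | cons p t ih =>
      intro a b hab
      simp only [List.foldl_cons]
      rw [ih (max a (p.2 : Int)) (max b (p.2 : Int)) (by omega)]
      have h1 : max b (p.2 : Int) ≤ t.foldl (fun a p => max a ((p.2 : Int))) (max b (p.2 : Int)) :=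
        foldl_max_le t _
      omega

theorem maxC_ge_one (R : List (Int × Nat)) : 1 ≤ maxC R := foldl_max_le R 1

theorem maxC_cons (y : Int) (c : Nat) (R : List (Int × Nat)) :
    maxC ((y, c) :: R) = max (c : Int) (maxC R) := by
  
  show List.foldl _ (max 1 (c : Int)) R = _
  rw [foldl_max_init R (max 1 (c : Int)) 1 (le_max_left _ _)]
  have h := maxC_ge_one R
  unfold maxC at h ⊢
  omega

theorem maxC_append (X Y : List (Int × Nat)) : maxC (X ++ Y) = max (maxC X) (maxC Y) := by
  
  show List.foldl _ 1 (X ++ Y) = _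
  rw [List.foldl_append]
  show List.foldl _ (maxC X) Y = _
  rw [foldl_max_init Y (maxC X) 1 (maxC_ge_one X)]
  rfl


theorem getLastD_append_right {X Y : List (Int × Nat)} (d : Int × Nat) (h : Y ≠ []) :
    (X ++ Y).getLastD d = Y.getLastD d := by
  rw [List.getLastD_eq_getLast?, List.getLastD_eq_getLast?, List.getLast?_append_of_ne_nil X h]

theorem getLastD_mem {α : Type} (d : α) : ∀ (a : α) (l : List α), (a :: l).getLastD d ∈ a :: l := by
  intro a l
  induction l generalizing a with
  | nil => simp
  | cons b t ih =>
      rw [List.getLastD_cons]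
      exact List.mem_cons_of_mem a (ih b)

theorem dropLast_append_getLastD {α : Type} (d : α) :
    ∀ (l : List α), l ≠ [] → l.dropLast ++ [l.getLastD d] = l := by
  intro l
  induction l with
  | nil => intro h; exact absurd rfl h
  | cons a t ih =>
      intro _
      cases t with
      | nil => simp
      | cons b t' =>
          rw [List.dropLast_cons₂, List.cons_append]
          have := ih (by simp)
          simp only [List.getLastD_cons] at this ⊢
          rw [this]

-- consRK prepends plainly when the head value differs
theorem consRK_head_ne (x : Int) (k : Nat) (C : List (Int × Nat)) (hC : C ≠ [])
    (h : x ≠ (C.headD (0, 0)).1) : consRK x k C = (x, k) :: C := by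
  cases C with
  | nil => exact absurd rfl hC
  | cons c t =>
      obtain ⟨z, j⟩ := c
      simp only [List.headD_cons] at h
      simp [consRK, beq_iff_eq, h]

-- fuse joins at the junction exactly when the boundary run values agree
theorem fuse_shape (A B : List (Int × Nat)) (hA : A ≠ []) (hB : B ≠ [])
    (hc : List.IsChain (fun p q => p.1 ≠ q.1) A) :
    fuse A B = if (A.getLastD (0, 0)).1 == (B.headD (0, 0)).1
      then A.dropLast ++ ((A.getLastD (0, 0)).1, (A.getLastD (0, 0)).2 + (B.headD (0, 0)).2) :: B.tail
      else A ++ B := by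
  induction A with
  | nil => exact absurd rfl hA
  | cons a A2 ih =>
      cases hA2 : A2 with
      | nil =>
          subst hA2
          cases B with
          | nil => exact absurd rfl hB
          | cons b B2 =>
              obtain ⟨va, ka⟩ := a
              obtain ⟨vb, kb⟩ := b
              show consRK va ka ((vb, kb) :: B2) = _
              by_cases h : va = vb
              · subst h
                simp [consRK, List.getLastD_cons]
              · simp [consRK, beq_iff_eq, h, List.getLastD_cons]
      | cons a2 A3 =>
          subst hA2
          have hcc := List.isChain_cons_cons.mp hc
          have hne : a.1 ≠ a2.1 := hcc.1
          have ihe := ih (by simp) hcc.2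
          have hstep : fuse (a :: a2 :: A3) B = consRK a.1 a.2 (fuse (a2 :: A3) B) := rfl
          rw [hstep, ihe]
          have hlast : ((a :: a2 :: A3).getLastD (0, 0)) = ((a2 :: A3).getLastD (0, 0)) := by
            simp [List.getLastD_cons]
          rw [hlast]
          by_cases hcond : ((a2 :: A3).getLastD (0, 0)).1 = (B.headD (0, 0)).1
          · rw [if_pos (by simpa [beq_iff_eq] using hcond),
                if_pos (by simpa [beq_iff_eq] using hcond)]
            have hhead : ((a2 :: A3).dropLast
                ++ (((a2 :: A3).getLastD (0, 0)).1,
                    ((a2 :: A3).getLastD (0, 0)).2 + (B.headD (0, 0)).2) :: B.tail) ≠ [] := by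
              simp
            rw [consRK_head_ne a.1 a.2 _ hhead]
            · rw [List.dropLast_cons₂, List.cons_append]
            · cases hA3 : A3 with
              | nil =>
                  subst hA3
                  simpa [List.getLastD_cons] using hne
              | cons a3 A4 =>
                  rw [List.dropLast_cons₂, List.cons_append]
                  simpa using hne
          · rw [if_neg (by simpa [beq_iff_eq] using hcond),
                if_neg (by simpa [beq_iff_eq] using hcond)]
            have hhead : ((a2 :: A3) ++ B) ≠ [] := by simp
            rw [consRK_head_ne a.1 a.2 _ hhead (by simpa using hne)]
            simp

theorem rle_cons (x : Int) (xs : List Int) :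
    rle (x :: xs) = (x, 1 + (xs.takeWhile (fun y => y == x)).length)
      :: rle (xs.dropWhile (fun y => y == x)) := by
  induction xs generalizing x with
  | nil => simp [rle, consRK]
  | cons y ys ih =>
      by_cases h : y = x
      · subst h
        show consRK y 1 (rle (y :: ys)) = _
        rw [ih y]
        simp only [consRK, beq_self_eq_true, if_pos, List.takeWhile_cons, beq_self_eq_true,
          ite_true, List.dropWhile_cons, List.length_cons]
        simp only [List.cons.injEq, Prod.mk.injEq]
        exact ⟨⟨trivial, by omega⟩, trivial⟩
      · show consRK x 1 (rle (y :: ys)) = _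
        rw [ih y]
        have hyx : (y == x) = false := by simp [h]
        simp only [consRK, beq_iff_eq, List.takeWhile_cons, List.dropWhile_cons, hyx,
          Bool.false_eq_true, if_false, List.length_nil]
        have hxy : ¬ x = y := fun hh => h hh.symm
        simp only [hxy, ite_false, List.cons.injEq, Prod.mk.injEq]
        exact ⟨trivial, (ih y).symm⟩

theorem lrSpec_eq_maxC (l : List Int) : lrSpec l = maxC (rle l) := by
  induction l using lrSpec.induct with
  | case1 => simp [lrSpec, rle, maxC]
  | case2 x xs ih =>
      rw [lrSpec, rle_cons, maxC_cons, ih]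
      push_cast
      omega

theorem spec_merge (l r : List Int) (hl : l ≠ []) (hr : r ≠ []) :
    specOf (l ++ r) = mergeB (specOf l) (specOf r) l.length r.length := by
  have hA := rle_ne_nil l hl
  have hB := rle_ne_nil r hr
  have hfuse := fuse_shape (rle l) (rle r) hA hB (rle_chain l)
  have happ := rle_append l r
  rw [hfuse] at happ
  cases hAe : rle l with
  | nil => exact absurd hAe hA
  | cons a A2 =>
  cases hBe : rle r with
  | nil => exact absurd hBe hB
  | cons b B2 =>
  rw [hAe, hBe] at happ
  simp only [List.headD_cons, List.tail_cons] at happ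
  have hposA : ∀ p ∈ a :: A2, 1 ≤ p.2 := by rw [← hAe]; exact rle_pos l
  have hposB : ∀ p ∈ b :: B2, 1 ≤ p.2 := by rw [← hBe]; exact rle_pos r
  have hsumA : ((a :: A2).map Prod.snd).sum = l.length := by rw [← hAe]; exact rle_sum l
  have hsumB : ((b :: B2).map Prod.snd).sum = r.length := by rw [← hBe]; exact rle_sum r
  have hlastA := getLastD_mem ((0 : Int), (0 : Nat)) a A2
  have hlastApos : 1 ≤ ((a :: A2).getLastD (0, 0)).2 := hposA _ hlastA
  have hbpos : 1 ≤ b.2 := hposB b (by simp)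
  have hapos : 1 ≤ a.2 := hposA a (by simp)
  by_cases hc : ((a :: A2).getLastD (0, 0)).1 = b.1
  · -- boundary values agree: the junction runs merge
    have hceq : ((((a :: A2).getLastD (0, 0)).1 : Int) == b.1) = true := beq_iff_eq.mpr hc
    rw [if_pos hceq] at happ
    simp only [specOf, mergeB]
    rw [happ, hAe, hBe]
    simp only [List.headD_cons, List.tail_cons, hceq, Bool.true_and]
    simp only [Prod.ext_iff]
    refine ⟨?_, ?_, ?_, ?_, ?_⟩
    · -- pref
      cases hA2 : A2 with
      | nil =>
          have hlen : l.length = a.2 := by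
            have h0 := hsumA
            rw [hA2] at h0
            simpa using h0.symm
          have hcnd : ((a.2 : Int) == (l.length : Int)) = true := by simp [hlen]
          simp only [hA2, List.getLastD_cons, List.getLastD_nil, List.dropLast_singleton,
            List.nil_append, List.headD_cons, hcnd, if_pos]
          push_cast
          ring
      | cons a2 A3 =>
          have h2pos : 1 ≤ a2.2 := hposA a2 (by simp [hA2])
          have hlen : a.2 + a2.2 ≤ l.length := by
            rw [← hsumA, hA2]
            simp
          have hne : ((a.2 : Int) == (l.length : Int)) = false := by
            rw [beq_eq_false_iff_ne]
            intro hcontra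
            have : a.2 = l.length := by exact_mod_cast hcontra
            omega
          simp only [hA2, List.dropLast_cons₂, List.cons_append, List.headD_cons, hne,
            Bool.false_eq_true, if_false]
    · -- suff
      rw [getLastD_append_right _ (by simp)]
      cases hB2 : B2 with
      | nil =>
          have hlen : r.length = b.2 := by
            have h0 := hsumB
            rw [hB2] at h0
            simpa using h0.symm
          have hcnd : ((b.2 : Int) == (r.length : Int)) = true := by simp [hlen]
          simp only [hB2, List.getLastD_cons, List.getLastD_nil, hcnd, if_pos]
          push_cast
          ring
      | cons b2 B3 =>
          have hmem := getLastD_mem ((0 : Int), (0 : Nat)) b2 B3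
          have hle : ((b2 :: B3).getLastD (0, 0)).2 ≤ ((b2 :: B3).map Prod.snd).sum :=
            List.le_sum_of_mem (List.mem_map_of_mem hmem)
          have hlen : b.2 + ((b2 :: B3).map Prod.snd).sum = r.length := by
            rw [← hsumB, hB2]
            simp
          have hne : ((((b2 :: B3).getLastD (0, 0)).2 : Int) == (r.length : Int)) = false := by
            rw [beq_eq_false_iff_ne]
            intro hcontra
            have : ((b2 :: B3).getLastD (0, 0)).2 = r.length := by exact_mod_cast hcontra
            omega
          simp only [List.getLastD_cons] at hne ⊢
          simp only [hB2, List.getLastD_cons, hne, Bool.false_eq_true, if_false]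
    · -- best
      rw [maxC_append, maxC_cons]
      have hdec := dropLast_append_getLastD ((0 : Int), (0 : Nat)) (a :: A2) (by simp)
      have hbl : maxC (a :: A2)
          = max (maxC ((a :: A2).dropLast)) ((((a :: A2).getLastD (0, 0)).2 : Int)) := by
        conv_lhs => rw [← hdec]
        rw [maxC_append, maxC_cons]
        have h1 : (1 : Int) ≤ (((a :: A2).getLastD (0, 0)).2 : Int) := by exact_mod_cast hlastApos
        have h2 := maxC_ge_one ((a :: A2).dropLast)
        have h3 : maxC ([] : List (Int × Nat)) = 1 := rfl
        rw [h3]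
        omega
      rw [hbl, maxC_cons]
      have h2 := maxC_ge_one ((a :: A2).dropLast)
      have h4 := maxC_ge_one B2
      have h1 : (1 : Int) ≤ (((a :: A2).getLastD (0, 0)).2 : Int) := by exact_mod_cast hlastApos
      have h5 : (1 : Int) ≤ (b.2 : Int) := by exact_mod_cast hbpos
      push_cast
      omega
    · -- first
      cases hA2 : A2 with
      | nil => simp [hA2, List.getLastD_cons]
      | cons a2 A3 => simp [hA2, List.dropLast_cons₂]
    · -- last
      rw [getLastD_append_right _ (by simp)]
      cases hB2 : B2 with
      | nil =>
          simp only [hB2, List.getLastD_cons, List.getLastD_nil]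
          rw [← List.getLastD_cons (a := ((0 : Int), (0 : Nat)))]
          exact hc
      | cons b2 B3 => simp [hB2, List.getLastD_cons]
  · -- boundary values differ: plain concatenation
    have hcneq : ((((a :: A2).getLastD (0, 0)).1 : Int) == b.1) = false := beq_eq_false_iff_ne.mpr hc
    rw [hcneq] at happ
    simp only [Bool.false_eq_true, if_false] at happ
    simp only [specOf, mergeB]
    rw [happ, hAe, hBe]
    simp only [List.headD_cons, hcneq, Bool.false_and, Bool.false_eq_true, if_false]
    simp only [Prod.ext_iff]
    refine ⟨?_, ?_, ?_, ?_, ?_⟩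
    · simp
    · rw [getLastD_append_right _ (by simp)]
    · exact maxC_append _ _
    · simp
    · rw [getLastD_append_right _ (by simp)]

theorem dcInfo_spec (seq : List Int) : ∀ (n lo hi : Nat), hi - lo = n → lo < hi → hi ≤ seq.length →
    dcInfo seq lo hi = specOf ((seq.drop lo).take (hi - lo)) := by
  
  intro n
  induction n using Nat.strong_induction_on with
  | _ n ih =>
      intro lo hi hn hlt hle
      rw [dcInfo]
      by_cases hbase : hi ≤ lo + 1
      · rw [if_pos hbase]
        have hhi : hi = lo + 1 := by omega
        subst hhi
        have hlo : lo < seq.length := by omega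
        have hdrop : seq.drop lo = seq[lo] :: seq.drop (lo + 1) := List.drop_eq_getElem_cons hlo
        rw [hdrop]
        simp only [Nat.add_sub_cancel_left]
        rw [List.take_succ_cons, List.take_zero]
        rw [List.getD_eq_getElem seq 0 hlo]
        show _ = specOf [seq[lo]]
        simp [specOf, rle, consRK, maxC, List.getLastD_cons]
      · rw [if_neg hbase]
        have h1 : lo < (lo + hi) / 2 := by omega
        have h2 : (lo + hi) / 2 < hi := by omega
        have ihl := ih ((lo + hi) / 2 - lo) (by omega) lo ((lo + hi) / 2) rfl h1 (by omega)
        have ihr := ih (hi - (lo + hi) / 2) (by omega) ((lo + hi) / 2) hi rfl h2 hle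
        rw [ihl, ihr]
        have hsplit : (seq.drop lo).take (hi - lo)
            = (seq.drop lo).take ((lo + hi) / 2 - lo)
              ++ (seq.drop ((lo + hi) / 2)).take (hi - (lo + hi) / 2) := by
          rw [show hi - lo = ((lo + hi) / 2 - lo) + (hi - (lo + hi) / 2) from by omega,
            List.take_add]
          congr 1
          rw [List.drop_drop]
          rw [show lo + ((lo + hi) / 2 - lo) = (lo + hi) / 2 from by omega]
        have hne1 : (seq.drop lo).take ((lo + hi) / 2 - lo) ≠ [] := by
          apply List.ne_nil_of_length_pos
          simp only [List.length_take, List.length_drop]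
          omega
        have hne2 : (seq.drop ((lo + hi) / 2)).take (hi - (lo + hi) / 2) ≠ [] := by
          apply List.ne_nil_of_length_pos
          simp only [List.length_take, List.length_drop]
          omega
        rw [hsplit, spec_merge _ _ hne1 hne2]
        have hlenL : ((seq.drop lo).take ((lo + hi) / 2 - lo)).length = (lo + hi) / 2 - lo := by
          simp only [List.length_take, List.length_drop]
          omega
        have hlenR : ((seq.drop ((lo + hi) / 2)).take (hi - (lo + hi) / 2)).length
            = hi - (lo + hi) / 2 := by
          simp only [List.length_take, List.length_drop]
          omega
        rw [hlenL, hlenR]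

theorem dcBest_eq (seq : List Int) (h : seq ≠ []) :
    (dcInfo seq 0 seq.length).2.2.1 = lrSpec seq := by
  
  have h0 : 0 < seq.length := List.length_pos_of_ne_nil h
  have hs := dcInfo_spec seq seq.length 0 seq.length rfl h0 le_rfl
  rw [hs]
  simp only [List.drop_zero, Nat.sub_zero, List.take_length]
  show maxC (rle seq) = lrSpec seq
  exact (lrSpec_eq_maxC seq).symm


theorem map_pyRange_eq_map_range (f : Int → Int) (g : Nat → Int) (n : Nat)
    (h : ∀ k : Nat, f (k : Int) = g k) :
    (PySem.List.pyRange 0 (n : Int) 1).map f = (List.range n).map g := by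
  rw [PySem.List.pyRange_zero_nat, List.map_map]
  exact List.map_congr_left (fun k _ => h k)

-- ===== VERDICT (by name: the statement is the Claim_ definition above) =====
theorem check_old_spec : Claim_equal_check_old := by
  intro mat _ hpre
  unfold Spec_check_old
  simp only [check_old, check_old_alt, PySem.List.pyRange_zero_nat, List.foldl_map]
  apply foldl_inv _ _ (fun a => 1 ≤ a) (List.range mat.length) 1 (by omega)
  intro b iN hmem hb
  have hi : iN < mat.length := List.mem_range.mp hmem
  have hN1 : 1 ≤ mat.length := by omega
  have hN0 : (0 : Int) < (mat.length : Int) := by exact_mod_cast hN1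
  have hcons : PySem.List.pyRange 0 (mat.length : Int) 1
      = 0 :: PySem.List.pyRange 1 (mat.length : Int) 1 := by
    have h := PySem.List.pyRange_one_cons (a := 0) (b := (mat.length : Int)) hN0
    norm_num at h
    exact h
  have hrowlist : (PySem.List.pyRange 0 (mat.length : Int) 1).map
      (fun j => PySem.List.pyGetD (mat.getD iN []) j 0)
      = (List.range mat.length).map (fun j => (mat.getD iN []).getD j 0) :=
    map_pyRange_eq_map_range _ _ _ (by intro k; simp [PySem.List.pyGetD_natCast])
  have hcollist : (PySem.List.pyRange 0 (mat.length : Int) 1).map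
      (fun j => PySem.List.pyGetD (PySem.List.pyGetD mat j []) (iN : Int) 0)
      = (List.range mat.length).map (fun j => (mat.getD j []).getD iN 0) :=
    map_pyRange_eq_map_range _ _ _ (by intro k; simp [PySem.List.pyGetD_natCast])
  rw [hcons, List.map_cons] at hrowlist hcollist
  cases hrk : (List.range mat.length).map (fun j => (mat.getD iN []).getD j 0) with
  | nil =>
      exfalso
      have hlen := congrArg List.length hrk
      simp only [List.length_map, List.length_range, List.length_nil] at hlen
      omega
  | cons x xs =>
  cases hck : (List.range mat.length).map (fun j => (mat.getD j []).getD iN 0) with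
  | nil =>
      exfalso
      have hlen := congrArg List.length hck
      simp only [List.length_map, List.length_range, List.length_nil] at hlen
      omega
  | cons y ys =>
  rw [hrk] at hrowlist
  rw [hck] at hcollist
  obtain ⟨hx, hxs⟩ := List.cons.injEq .. ▸ hrowlist
  obtain ⟨hy, hys⟩ := List.cons.injEq .. ▸ hcollist
  refine ⟨?_, by omega⟩
  simp only [PySem.List.pyGetD_natCast mat iN []]
  have h10 : ((1 : Int) - 1) = 0 := by norm_num
  have hb1 := bridgeA (fun j => PySem.List.pyGetD (mat.getD iN []) j 0)
    (mat.length : Int) ((mat.length : Int) - 1).toNat 1 1 b rfl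
  rw [h10] at hb1
  rw [hb1, hxs]
  beta_reduce
  rw [hx, scanPairs_head xs x b hb]
  have hb2 := bridgeA (fun j => PySem.List.pyGetD (PySem.List.pyGetD mat j []) (iN : Int) 0)
    (mat.length : Int) ((mat.length : Int) - 1).toNat 1 1 (max b (lrSpec (x :: xs))) rfl
  rw [h10] at hb2
  rw [hb2, hys]
  beta_reduce
  rw [hy, scanPairs_head ys y _ (by omega)]
  have hlx : (x :: xs).length = mat.length := by
    have := congrArg List.length hrk
    simpa using this.symm
  have hly : (y :: ys).length = mat.length := by
    have := congrArg List.length hck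
    simpa using this.symm
  have hd1 : (dcInfo (x :: xs) 0 mat.length).2.2.1 = lrSpec (x :: xs) := by
    rw [← hlx]
    exact dcBest_eq _ (by simp)
  have hd2 : (dcInfo (y :: ys) 0 mat.length).2.2.1 = lrSpec (y :: ys) := by
    rw [← hly]
    exact dcBest_eq _ (by simp)
  rw [hd1, hd2]
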